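-- pv_equiv track=rewrite | github.com/miguelartaga/proyectosw1 | backend/app/routers/ai.py | clean_relation_table_name
-- ===== SOURCE A (Python) =====
-- RELATION_TAIL_STOPWORDS = {
--     "relacion",
--     "relaciones",
--     "asociacion",
--     "asociaciones",
--     "multiplicidad",
--     "multiplidad",
-- }
--
-- def clean_table_phrase(table_raw: str) -> str:
--     tokens = table_raw.strip().split()
--     if not tokens:
--         return ""
--     filler = {"el", "la", "los", "las", "un", "una", "unos", "unas", "de", "del", "al", "con"}
--     while tokens and tokens[0] in filler:
--         tokens.pop(0)
--     while tokens and tokens[-1] in filler: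
--         tokens.pop()
--     return " ".join(tokens)
--
-- def clean_relation_table_name(table_raw: str) -> str:
--     tokens = clean_table_phrase(table_raw).split()
--     if not tokens:
--         return ""
--     filler = {"el", "la", "los", "las", "un", "una", "unos", "unas", "de", "del", "al", "con"}
--     while tokens and (tokens[0] in filler or tokens[0] in RELATION_TAIL_STOPWORDS):
--         tokens.pop(0)
--     while tokens and (tokens[-1] in filler or tokens[-1] in RELATION_TAIL_STOPWORDS):
--         tokens.pop()
--     return " ".join(tokens)
-- ===== SOURCE B (Python) =====
-- RELATION_TAIL_STOPWORDS = {
--     "relacion",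
--     "relaciones",
--     "asociacion",
--     "asociaciones",
--     "multiplicidad",
--     "multiplidad",
-- }
--
-- _FILLER = {"el", "la", "los", "las", "un", "una", "unos", "unas", "de", "del", "al", "con"}
--
--
-- def _trim(tokens, stop):
--     # drop the leading run of stopword tokens
--     for k, t in enumerate(tokens):
--         if t not in stop:
--             return tokens[k:]
--     return []
--
--
-- def clean_relation_table_name(table_raw: str) -> str:
--     combined = _FILLER | RELATION_TAIL_STOPWORDS
--     tokens = _trim(table_raw.split(), combined)
--     tokens = _trim(tokens[::-1], combined)[::-1]
--     return " ".join(tokens)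
-- ===== Notes on version B (the rewrite author's own statement) =====
-- stated objective: simpler
-- what changed: B merges the filler and relation-stopword sets once and trims each end of the token list a single time (front trim, then front trim of the reversed list), replacing A's two-stage pipeline of four pop-based while loops with an intermediate join and re-split.
import Mathlib
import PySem

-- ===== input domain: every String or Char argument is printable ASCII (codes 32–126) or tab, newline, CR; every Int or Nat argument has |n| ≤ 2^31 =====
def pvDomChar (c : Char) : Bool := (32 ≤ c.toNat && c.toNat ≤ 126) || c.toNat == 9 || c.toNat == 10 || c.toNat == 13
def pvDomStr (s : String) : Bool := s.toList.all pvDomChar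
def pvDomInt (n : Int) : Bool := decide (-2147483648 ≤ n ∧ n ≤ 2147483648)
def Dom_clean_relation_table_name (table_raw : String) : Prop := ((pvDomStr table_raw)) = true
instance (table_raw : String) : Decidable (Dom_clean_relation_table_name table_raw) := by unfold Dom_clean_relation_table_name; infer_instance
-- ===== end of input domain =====

-- B replaces A's two-stage trim (filler pop-loops, join, re-split, filler-or-stopword pop-loops)
-- by one trim of each end over the merged stopword set; objective: simpler.

-- ===== PORT A =====
def pvRelStopA : PySem.Set String :=
  PySem.Set.ofList ["relacion", "relaciones", "asociacion", "asociaciones", "multiplicidad", "multiplidad"]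

def pvFillerA : PySem.Set String :=
  PySem.Set.ofList ["el", "la", "los", "las", "un", "una", "unos", "unas", "de", "del", "al", "con"]

-- 'while tokens and p(tokens[0]): tokens.pop(0)'
def pvPopFrontA (p : String → Bool) : List String → List String
  | [] => []
  | t :: rest => if p t then pvPopFrontA p rest else t :: rest

-- 'while tokens and p(tokens[-1]): tokens.pop()' — the pop-from-end loop is the pop-from-front loop on the reversed list
def pvPopBackA (p : String → Bool) (l : List String) : List String :=
  (pvPopFrontA p l.reverse).reverse

def clean_table_phrase (table_raw : String) : String :=
  let tokens := PySem.Str.split₀ (PySem.Str.strip table_raw)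
  if tokens = [] then ""
  else
    let tokens := pvPopFrontA (fun t => decide (t ∈ pvFillerA)) tokens
    let tokens := pvPopBackA (fun t => decide (t ∈ pvFillerA)) tokens
    PySem.Str.join " " tokens

def clean_relation_table_name (table_raw : String) : String :=
  let tokens := PySem.Str.split₀ (clean_table_phrase table_raw)
  if tokens = [] then ""
  else
    let tokens := pvPopFrontA (fun t => decide (t ∈ pvFillerA) || decide (t ∈ pvRelStopA)) tokens
    let tokens := pvPopBackA (fun t => decide (t ∈ pvFillerA) || decide (t ∈ pvRelStopA)) tokens
    PySem.Str.join " " tokens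

-- ===== PORT B =====
def pvRelStopB : PySem.Set String :=
  PySem.Set.ofList ["relacion", "relaciones", "asociacion", "asociaciones", "multiplicidad", "multiplidad"]

def pvFillerB : PySem.Set String :=
  PySem.Set.ofList ["el", "la", "los", "las", "un", "una", "unos", "unas", "de", "del", "al", "con"]

-- combined = _FILLER | RELATION_TAIL_STOPWORDS
def pvCombinedB : PySem.Set String := PySem.Set.union pvFillerB pvRelStopB

-- _trim: 'for k, t in enumerate(tokens): if t not in stop: return tokens[k:]; return []'
def pvTrimB (tokens : List String) (stop : PySem.Set String) : List String :=
  match tokens with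
  | [] => []
  | t :: rest => if t ∈ stop then pvTrimB rest stop else t :: rest

def clean_relation_table_name_alt (table_raw : String) : String :=
  let tokens := pvTrimB (PySem.Str.split₀ table_raw) pvCombinedB
  let tokens := (pvTrimB tokens.reverse pvCombinedB).reverse
  PySem.Str.join " " tokens

-- ===== PRECONDITION & SPEC =====
def Spec_clean_relation_table_name (table_raw : String) (out : String) : Prop := out = clean_relation_table_name_alt table_raw
instance (table_raw : String) (out : String) : Decidable (Spec_clean_relation_table_name table_raw out) := by unfold Spec_clean_relation_table_name; infer_instance

-- ===== CLAIM (what is proved, stated in full; the proofs are below) =====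
def Claim_equal_clean_relation_table_name : Prop := ∀ (table_raw : String), Dom_clean_relation_table_name table_raw → Spec_clean_relation_table_name table_raw (clean_relation_table_name table_raw)

-- ===== LEMMAS AND PROOFS =====

-- the two trim helpers are List.dropWhile
theorem pvPopFrontA_eq (p : String → Bool) (l : List String) :
    pvPopFrontA p l = List.dropWhile p l := by
  induction l with
  | nil => rfl
  | cons t rest ih => simp [pvPopFrontA, List.dropWhile_cons, ih]

theorem pvTrimB_eq (l : List String) (s : PySem.Set String) :
    pvTrimB l s = List.dropWhile (fun t => decide (t ∈ s)) l := by
  induction l with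
  | nil => rfl
  | cons t rest ih =>
    rw [pvTrimB, List.dropWhile_cons, ih]
    by_cases h : t ∈ s <;> simp [h]

-- trim-from-the-back, the shape both ports share after the helper lemmas
def pvRD (p : String → Bool) (l : List String) : List String :=
  (List.dropWhile p l.reverse).reverse

theorem pvRD_cons (p : String → Bool) (x : String) (u : List String) :
    pvRD p (x :: u) =
      if pvRD p u = [] then (if p x then [] else [x]) else x :: pvRD p u := by
  unfold pvRD
  rw [List.reverse_cons, List.dropWhile_append]
  by_cases h : List.dropWhile p u.reverse = []
  · simp [h, List.dropWhile]
    by_cases hx : p x <;> simp [hx]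
  · simp [h, List.isEmpty_iff]

theorem pvRD_eq_nil_iff (p : String → Bool) (l : List String) :
    pvRD p l = [] ↔ ∀ x ∈ l, p x = true := by
  unfold pvRD
  rw [List.reverse_eq_nil_iff, List.dropWhile_eq_nil_iff]
  constructor
  · intro h x hx; exact h x (List.mem_reverse.mpr hx)
  · intro h x hx; exact h x (List.mem_reverse.mp hx)

theorem pvDrop_drop (p q : String → Bool) (hsub : ∀ t, q t = true → p t = true)
    (l : List String) :
    List.dropWhile p (List.dropWhile q l) = List.dropWhile p l := by
  induction l with
  | nil => rfl
  | cons x xs ih =>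
    by_cases hq : q x
    · rw [List.dropWhile_cons_of_pos hq, ih, List.dropWhile_cons_of_pos (hsub x hq)]
    · rw [List.dropWhile_cons_of_neg hq]

theorem pvRD_RD (p q : String → Bool) (hsub : ∀ t, q t = true → p t = true)
    (l : List String) :
    pvRD p (pvRD q l) = pvRD p l := by
  unfold pvRD
  rw [List.reverse_reverse, pvDrop_drop p q hsub]

-- the key algebraic fact: trimming both ends with the filler set first changes nothing
-- when both ends are afterwards trimmed with the larger combined set
theorem pvMain (p q : String → Bool) (hsub : ∀ t, q t = true → p t = true)
    (m : List String) :
    pvRD p (List.dropWhile p (pvRD q m)) = pvRD p (List.dropWhile p m) := by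
  induction m with
  | nil => rfl
  | cons x xs ih =>
    rw [pvRD_cons q x xs]
    by_cases hnil : pvRD q xs = []
    · have hallp : ∀ y ∈ xs, p y = true :=
        fun y hy => hsub y ((pvRD_eq_nil_iff q xs).mp hnil y hy)
      have hxs : List.dropWhile p xs = [] := List.dropWhile_eq_nil_iff.mpr hallp
      rw [if_pos hnil]
      by_cases hqx : q x = true
      · rw [if_pos hqx, List.dropWhile_cons_of_pos (hsub x hqx), hxs]
        rfl
      · rw [if_neg hqx]
        by_cases hpx : p x = true
        · rw [List.dropWhile_cons_of_pos (l := ([] : List String)) hpx,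
            List.dropWhile_cons_of_pos (l := xs) hpx, hxs]
          rfl
        · rw [List.dropWhile_cons_of_neg (l := ([] : List String)) (by simp [hpx]),
            List.dropWhile_cons_of_neg (l := xs) (by simp [hpx]),
            pvRD_cons p x ([] : List String), pvRD_cons p x xs,
            if_pos (show pvRD p ([] : List String) = [] from rfl),
            if_pos ((pvRD_eq_nil_iff p xs).mpr hallp)]
    · rw [if_neg hnil]
      by_cases hpx : p x = true
      · rw [List.dropWhile_cons_of_pos (l := pvRD q xs) hpx,
          List.dropWhile_cons_of_pos (l := xs) hpx, ih]
      · rw [List.dropWhile_cons_of_neg (l := pvRD q xs) (by simp [hpx]),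
          List.dropWhile_cons_of_neg (l := xs) (by simp [hpx]),
          pvRD_cons p x (pvRD q xs), pvRD_cons p x xs, pvRD_RD p q hsub]

-- ---- facts about Python str.split() / str.strip() / ' '.join needed to collapse A's join-then-resplit stage ----

-- one-step unfoldings of the split() worker (definitional)
theorem pvGo_nil (cur : List Char) (acc : List (List Char)) :
    PySem.Chars.split₀.go [] cur acc =
      if cur.isEmpty then acc.reverse else (cur.reverse :: acc).reverse := rfl

theorem pvGo_cons (c : Char) (s cur : List Char) (acc : List (List Char)) :
    PySem.Chars.split₀.go (c :: s) cur acc =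
      if PySem.Chars.isspace c then
        (if cur.isEmpty then PySem.Chars.split₀.go s [] acc
         else PySem.Chars.split₀.go s [] (cur.reverse :: acc))
      else PySem.Chars.split₀.go s (c :: cur) acc := rfl

-- a run of whitespace at the end of the input contributes nothing
theorem pvGo_allspace (t : List Char) (cur : List Char) (acc : List (List Char))
    (h : ∀ c ∈ t, PySem.Chars.isspace c = true) :
    PySem.Chars.split₀.go t cur acc = PySem.Chars.split₀.go [] cur acc := by
  induction t generalizing cur acc with
  | nil => rfl
  | cons c t' ih =>
    have hc : PySem.Chars.isspace c = true := h c List.mem_cons_self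
    have ht' : ∀ d ∈ t', PySem.Chars.isspace d = true := fun d hd => h d (List.mem_cons_of_mem c hd)
    rw [pvGo_cons, if_pos hc, pvGo_nil]
    by_cases hcur : cur.isEmpty = true
    · rw [if_pos hcur, if_pos hcur, ih _ _ ht', pvGo_nil]
      simp
    · rw [if_neg hcur, if_neg hcur, ih _ _ ht', pvGo_nil]
      simp

theorem pvGo_append_space (u t : List Char) (cur : List Char) (acc : List (List Char))
    (h : ∀ c ∈ t, PySem.Chars.isspace c = true) :
    PySem.Chars.split₀.go (u ++ t) cur acc = PySem.Chars.split₀.go u cur acc := by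
  induction u generalizing cur acc with
  | nil => simpa using pvGo_allspace t cur acc h
  | cons c u' ih =>
    rw [List.cons_append, pvGo_cons, pvGo_cons]
    by_cases hc : PySem.Chars.isspace c = true
    · rw [if_pos hc, if_pos hc]
      by_cases hcur : cur.isEmpty = true
      · rw [if_pos hcur, if_pos hcur, ih]
      · rw [if_neg hcur, if_neg hcur, ih]
    · rw [if_neg hc, if_neg hc, ih]

-- leading whitespace contributes nothing
theorem pvSplit_dropWhile (cs : List Char) :
    PySem.Chars.split₀ (List.dropWhile PySem.Chars.isspace cs) = PySem.Chars.split₀ cs := by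
  induction cs with
  | nil => rfl
  | cons c cs' ih =>
    by_cases hc : PySem.Chars.isspace c = true
    · rw [List.dropWhile_cons_of_pos hc, ih]
      show _ = PySem.Chars.split₀.go (c :: cs') [] []
      rw [pvGo_cons, if_pos hc]
      rfl
    · rw [List.dropWhile_cons_of_neg (by simp [hc])]

-- s.strip().split() == s.split()
theorem pvSplit_strip (cs : List Char) :
    PySem.Chars.split₀ (PySem.Chars.strip cs) = PySem.Chars.split₀ cs := by
  show PySem.Chars.split₀ (PySem.Chars.rstrip (PySem.Chars.lstrip cs)) = _
  have hmid : PySem.Chars.lstrip cs =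
      PySem.Chars.rstrip (PySem.Chars.lstrip cs) ++
        (List.takeWhile PySem.Chars.isspace (PySem.Chars.lstrip cs).reverse).reverse := by
    show PySem.Chars.lstrip cs =
      (List.dropWhile PySem.Chars.isspace (PySem.Chars.lstrip cs).reverse).reverse ++ _
    rw [← List.reverse_append, List.takeWhile_append_dropWhile, List.reverse_reverse]
  have h1 : PySem.Chars.split₀ (PySem.Chars.lstrip cs) =
      PySem.Chars.split₀ (PySem.Chars.rstrip (PySem.Chars.lstrip cs)) := by
    conv_lhs => rw [hmid]
    exact pvGo_append_space _ _ [] []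
      (fun c hc => List.mem_takeWhile_imp (List.mem_reverse.mp hc))
  rw [← h1]
  exact pvSplit_dropWhile cs

-- every piece produced by str.split() is a nonempty run of non-whitespace characters
theorem pvGo_valid (s : List Char) (cur : List Char) (acc : List (List Char))
    (hacc : ∀ x ∈ acc, x ≠ [] ∧ ∀ c ∈ x, PySem.Chars.isspace c = false)
    (hcur : ∀ c ∈ cur, PySem.Chars.isspace c = false) :
    ∀ x ∈ PySem.Chars.split₀.go s cur acc, x ≠ [] ∧ ∀ c ∈ x, PySem.Chars.isspace c = false := by
  induction s generalizing cur acc with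
  | nil =>
    intro x hx
    rw [pvGo_nil] at hx
    by_cases hcurE : cur.isEmpty = true
    · rw [if_pos hcurE] at hx
      exact hacc x (List.mem_reverse.mp hx)
    · rw [if_neg hcurE] at hx
      rcases List.mem_cons.mp (List.mem_reverse.mp hx) with h | h
      · subst h
        refine ⟨by simpa using (List.isEmpty_eq_false_iff.mp (by simpa using hcurE)), ?_⟩
        intro c hc
        exact hcur c (List.mem_reverse.mp hc)
      · exact hacc x h
  | cons c s' ih =>
    intro x hx
    rw [pvGo_cons] at hx
    by_cases hc : PySem.Chars.isspace c = true
    · rw [if_pos hc] at hx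
      by_cases hcurE : cur.isEmpty = true
      · rw [if_pos hcurE] at hx
        exact ih [] acc hacc (by simp) x hx
      · rw [if_neg hcurE] at hx
        refine ih [] (cur.reverse :: acc) ?_ (by simp) x hx
        intro y hy
        rcases List.mem_cons.mp hy with h | h
        · subst h
          refine ⟨by simpa using (List.isEmpty_eq_false_iff.mp (by simpa using hcurE)), ?_⟩
          intro d hd
          exact hcur d (List.mem_reverse.mp hd)
        · exact hacc y h
    · rw [if_neg hc] at hx
      refine ih (c :: cur) acc hacc ?_ x hx
      intro d hd
      rcases List.mem_cons.mp hd with h | h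
      · subst h; simpa using hc
      · exact hcur d h

-- ' '.join(words) splits back into exactly those words
theorem pvGo_word (w s cur : List Char) (acc : List (List Char))
    (h : ∀ c ∈ w, PySem.Chars.isspace c = false) :
    PySem.Chars.split₀.go (w ++ s) cur acc = PySem.Chars.split₀.go s (w.reverse ++ cur) acc := by
  induction w generalizing cur with
  | nil => simp
  | cons c w' ih =>
    have hc : PySem.Chars.isspace c = false := h c List.mem_cons_self
    rw [List.cons_append, pvGo_cons, if_neg (by simp [hc]),
      ih (c :: cur) (fun d hd => h d (List.mem_cons_of_mem c hd))]
    simp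

theorem pvGo_intercalate (ts : List (List Char)) (acc : List (List Char))
    (h : ∀ w ∈ ts, w ≠ [] ∧ ∀ c ∈ w, PySem.Chars.isspace c = false) :
    PySem.Chars.split₀.go (List.intercalate [' '] ts) [] acc = acc.reverse ++ ts := by
  induction ts generalizing acc with
  | nil => simp [List.intercalate, pvGo_nil]
  | cons w tail ih =>
    obtain ⟨hw, hwc⟩ := h w List.mem_cons_self
    have htail : ∀ w ∈ tail, w ≠ [] ∧ ∀ c ∈ w, PySem.Chars.isspace c = false :=
      fun v hv => h v (List.mem_cons_of_mem w hv)
    cases tail with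
    | nil =>
      rw [show List.intercalate [' '] [w] = w by simp [List.intercalate]]
      rw [show w = w ++ ([] : List Char) by simp, pvGo_word w [] [] acc hwc, pvGo_nil,
        if_neg (by simpa using hw)]
      simp
    | cons w' rest =>
      rw [show List.intercalate [' '] (w :: w' :: rest) =
            w ++ ([' '] ++ List.intercalate [' '] (w' :: rest)) by simp [List.intercalate],
        pvGo_word w _ [] acc hwc, List.singleton_append, pvGo_cons,
        if_pos (by decide), if_neg (by simpa using hw),
        List.append_nil, List.reverse_reverse, ih (w :: acc) htail]
      simp

-- ---- transfer to the String level ----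

theorem pvMapToList_inj (a b : List String) (h : a.map String.toList = b.map String.toList) :
    a = b := by
  induction a generalizing b with
  | nil => cases b <;> simp_all
  | cons x a' ih =>
    cases b with
    | nil => simp_all
    | cons y b' =>
      simp only [List.map_cons, List.cons.injEq] at h
      exact by rw [String.toList_inj.mp h.1, ih b' h.2]

theorem pvStr_split_strip (s : String) :
    PySem.Str.split₀ (PySem.Str.strip s) = PySem.Str.split₀ s := by
  apply pvMapToList_inj
  rw [PySem.Str.split₀_map_toList, PySem.Str.split₀_map_toList, PySem.Str.toList_strip,
    pvSplit_strip]

theorem pvStr_split_valid (s : String) :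
    ∀ t ∈ PySem.Str.split₀ s, t.toList ≠ [] ∧ ∀ c ∈ t.toList, PySem.Chars.isspace c = false := by
  intro t ht
  have : t.toList ∈ PySem.Chars.split₀ s.toList := by
    rw [← PySem.Str.split₀_map_toList]
    exact List.mem_map_of_mem ht
  exact pvGo_valid s.toList [] [] (by simp) (by simp) t.toList this

theorem pvStr_roundtrip (ts : List String)
    (h : ∀ t ∈ ts, t.toList ≠ [] ∧ ∀ c ∈ t.toList, PySem.Chars.isspace c = false) :
    PySem.Str.split₀ (PySem.Str.join " " ts) = ts := by
  apply pvMapToList_inj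
  rw [PySem.Str.split₀_map_toList, PySem.Str.toList_join]
  show PySem.Chars.split₀ (PySem.Chars.join [' '] (ts.map String.toList)) = _
  show PySem.Chars.split₀.go (List.intercalate [' '] (ts.map String.toList)) [] [] = _
  rw [pvGo_intercalate _ [] ?_]
  · simp
  · intro w hw
    rcases List.mem_map.mp hw with ⟨t, ht, rfl⟩
    exact h t ht

-- ---- assembling the two ports ----

def pvPF : String → Bool := fun t => decide (t ∈ pvFillerA)
def pvPC : String → Bool := fun t => decide (t ∈ pvFillerA) || decide (t ∈ pvRelStopA)

theorem pvPopBackA_eq (p : String → Bool) (l : List String) :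
    pvPopBackA p l = pvRD p l := by
  unfold pvPopBackA pvRD
  rw [pvPopFrontA_eq]

theorem pvRD_subset (p : String → Bool) (l : List String) (x : String) (hx : x ∈ pvRD p l) :
    x ∈ l := by
  unfold pvRD at hx
  exact List.mem_reverse.mp ((List.dropWhile_sublist _).subset (List.mem_reverse.mp hx))

theorem pvDrop_subset (p : String → Bool) (l : List String) (x : String)
    (hx : x ∈ List.dropWhile p l) : x ∈ l :=
  (List.dropWhile_sublist _).subset hx

theorem pvA_eq (s : String) :
    clean_relation_table_name s =
      PySem.Str.join " "
        (pvRD pvPC (List.dropWhile pvPC (pvRD pvPF (List.dropWhile pvPF (PySem.Str.split₀ s))))) := by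
  unfold clean_relation_table_name clean_table_phrase
  simp only [pvPopFrontA_eq, pvPopBackA_eq, pvStr_split_strip]
  by_cases h0 : PySem.Str.split₀ s = []
  · rw [if_pos h0, h0]
    rfl
  · rw [if_neg h0]
    have hval : ∀ t ∈ pvRD pvPF (List.dropWhile pvPF (PySem.Str.split₀ s)),
        t.toList ≠ [] ∧ ∀ c ∈ t.toList, PySem.Chars.isspace c = false := by
      intro t ht
      exact pvStr_split_valid s t (pvDrop_subset _ _ _ (pvRD_subset _ _ _ ht))
    rw [show (fun t => decide (t ∈ pvFillerA)) = pvPF from rfl, pvStr_roundtrip _ hval]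
    by_cases h1 : pvRD pvPF (List.dropWhile pvPF (PySem.Str.split₀ s)) = []
    · rw [if_pos h1, h1]
      rfl
    · rw [if_neg h1]
      rfl

theorem pvB_eq (s : String) :
    clean_relation_table_name_alt s =
      PySem.Str.join " " (pvRD pvPC (List.dropWhile pvPC (PySem.Str.split₀ s))) := by
  unfold clean_relation_table_name_alt
  simp only [pvTrimB_eq]
  have hpc : (fun t => decide (t ∈ pvCombinedB)) = pvPC := by
    funext t
    have hiff : (t ∈ pvCombinedB) ↔ (t ∈ pvFillerA ∨ t ∈ pvRelStopA) := by
      unfold pvCombinedB pvFillerA pvFillerB pvRelStopA pvRelStopB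
      rw [PySem.Set.mem_union]
    rw [show pvPC t = (decide (t ∈ pvFillerA) || decide (t ∈ pvRelStopA)) from rfl,
      ← Bool.decide_or, decide_eq_decide]
    exact hiff
  rw [hpc]
  rfl

-- ===== VERDICT (by name: the statement is the Claim_ definition above) =====
theorem clean_relation_table_name_spec : Claim_equal_clean_relation_table_name := by
  intro s _hdom
  show clean_relation_table_name s = clean_relation_table_name_alt s
  rw [pvA_eq, pvB_eq,
    pvMain pvPC pvPF (fun t h => by simp [pvPC, pvPF] at h ⊢; exact Or.inl h),
    pvDrop_drop pvPC pvPF (fun t h => by simp [pvPC, pvPF] at h ⊢; exact Or.inl h)]
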